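-- pv_equiv track=rewrite | github.com/IyladaK/AfS-SoftwareAssignment2 | utils.py | leadingZerosArr
-- ===== SOURCE A (Python) =====
-- from typing import List
--
-- Poly = List[int] #from the coefficient of lowest degree to coefficient of highest degree
--
-- def leadingZerosArr (x:Poly) -> Poly:
--     if not x:
--         return [0]
--     i = len(x)-1
--     while i > 0 and x[i] == 0:
--         i-=1
--         if i < 0 :
--             return [0]
--     return x[:i+1]
-- ===== SOURCE B (Python) =====
-- def leadingZerosArr(x):
--     if not x:
--         return [0]
--     last = 0
--     for idx, v in enumerate(x):
--         if v != 0: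
--             last = idx
--     return x[:last + 1]
-- ===== Notes on version B (the rewrite author's own statement) =====
-- stated objective: simpler
-- what changed: Replaces A's backward early-terminating while-loop that shrinks a boundary index with a single forward enumerate pass that records the index of the last non-zero coefficient and slices once.
import Mathlib
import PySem

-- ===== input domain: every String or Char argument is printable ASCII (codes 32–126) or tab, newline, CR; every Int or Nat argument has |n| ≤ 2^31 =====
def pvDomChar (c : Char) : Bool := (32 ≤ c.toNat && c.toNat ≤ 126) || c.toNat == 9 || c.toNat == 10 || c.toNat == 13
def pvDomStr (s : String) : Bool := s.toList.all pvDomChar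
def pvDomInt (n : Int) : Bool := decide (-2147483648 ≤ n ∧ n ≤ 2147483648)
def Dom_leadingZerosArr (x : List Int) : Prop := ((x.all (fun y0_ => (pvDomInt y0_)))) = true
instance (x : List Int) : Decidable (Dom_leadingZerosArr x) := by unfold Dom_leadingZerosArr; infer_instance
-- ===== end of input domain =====

-- B replaces A's backward early-terminating scan with a single forward pass that
-- records the index of the last non-zero coefficient; same O(n) cost, simpler shape.

-- ===== PORT A =====
-- A's while-loop 'while i > 0 and x[i] == 0: i -= 1', ported as recursion on i.
-- i starts at len(x)-1 ≥ 0 and only decrements when i > 0, so i stays ≥ 0 and the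
-- 'if i < 0: return [0]' branch is dead; x[i] is always in range, so pyGetD is exact.
def leadingZerosArrLoop (x : List Int) : Nat → List Int
  | 0 => PySem.List.slice x none (some ((1 : Nat) : Int))
  | i + 1 =>
    if PySem.List.pyGetD x ((i + 1 : Nat) : Int) 0 = 0 then
      leadingZerosArrLoop x i
    else
      PySem.List.slice x none (some ((i + 2 : Nat) : Int))

def leadingZerosArr (x : List Int) : List Int :=
  if x = [] then [0]
  else leadingZerosArrLoop x (x.length - 1)

-- ===== PORT B =====
-- loop body of Source B: 'if v != 0: last = idx'
def lastStep : Int → Int × Int → Int := fun last p => if p.2 ≠ 0 then p.1 else last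

def leadingZerosArr_alt (x : List Int) : List Int :=
  if x = [] then [0]
  else
    let last := (PySem.List.enumerate x 0).foldl lastStep 0
    PySem.List.slice x none (some (last + 1))

-- ===== PRECONDITION & SPEC =====
def Spec_leadingZerosArr (x : List Int) (out : List Int) : Prop := out = leadingZerosArr_alt x
instance (x : List Int) (out : List Int) : Decidable (Spec_leadingZerosArr x out) := by unfold Spec_leadingZerosArr; infer_instance

-- ===== CLAIM (what is proved, stated in full; the proofs are below) =====
def Claim_equal_leadingZerosArr : Prop := ∀ (x : List Int), Dom_leadingZerosArr x → Spec_leadingZerosArr x (leadingZerosArr x)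

-- ===== LEMMAS AND PROOFS =====

-- The fold's result is the accumulator or a recorded index in [s, s + length).
theorem lastStep_bound (x : List Int) : ∀ (s acc : Int),
    (PySem.List.enumerate x s).foldl lastStep acc = acc ∨
    (s ≤ (PySem.List.enumerate x s).foldl lastStep acc ∧
     (PySem.List.enumerate x s).foldl lastStep acc < s + x.length) := by
  induction x with
  | nil => intro s acc; left; simp [PySem.List.enumerate_nil]
  | cons a t ih =>
    intro s acc
    rw [PySem.List.enumerate_cons]
    simp only [List.foldl_cons, lastStep, List.length_cons]
    by_cases h : a ≠ 0
    · rw [if_pos h]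
      rcases ih (s + 1) s with h1 | h1 <;> right <;>
        [skip; skip] <;> push_cast <;> omega
    · rw [if_neg h]
      rcases ih (s + 1) acc with h1 | h1
      · left; exact h1
      · right; push_cast at h1 ⊢; omega

-- Appending an element updates B's fold as expected.
theorem lastStep_append (x : List Int) (a : Int) (s acc : Int) :
    (PySem.List.enumerate (x ++ [a]) s).foldl lastStep acc =
      if a ≠ 0 then s + x.length
      else (PySem.List.enumerate x s).foldl lastStep acc := by
  rw [PySem.List.enumerate_append, List.foldl_append]
  by_cases h : a ≠ 0 <;>
    simp [PySem.List.enumerate_cons, PySem.List.enumerate_nil, lastStep, h]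

-- A's loop only inspects indices ≤ i and the prefix x[:·], so a longer list agrees.
theorem loop_append (x : List Int) (a : Int) : ∀ (i : Nat), i < x.length →
    leadingZerosArrLoop (x ++ [a]) i = leadingZerosArrLoop x i := by
  intro i
  induction i with
  | zero =>
    intro h
    simp only [leadingZerosArrLoop, PySem.List.slice_to_natCast]
    rw [List.take_append_of_le_length (by omega)]
  | succ i ih =>
    intro h
    simp only [leadingZerosArrLoop]
    rw [PySem.List.pyGetD_natCast, PySem.List.pyGetD_natCast]
    have hg : (x ++ [a]).getD (i + 1) 0 = x.getD (i + 1) 0 := by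
      rw [List.getD_eq_getElem?_getD, List.getD_eq_getElem?_getD,
        List.getElem?_append_left (by omega)]
    rw [hg]
    split
    · exact ih (by omega)
    · simp only [PySem.List.slice_to_natCast]
      rw [List.take_append_of_le_length (by omega)]

-- Main equivalence for nonempty lists, by reverse (snoc) induction.
theorem main_eq : ∀ (x : List Int), x ≠ [] →
    leadingZerosArr x = leadingZerosArr_alt x := by
  intro x
  induction x using List.reverseRecOn with
  | nil => intro h; exact absurd rfl h
  | append_singleton t a ih =>
    intro _
    by_cases ht : t = []
    · subst ht
      simp only [leadingZerosArr, leadingZerosArr_alt, List.nil_append,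
        if_neg (List.cons_ne_nil a [])]
      simp only [List.length_cons, List.length_nil, Nat.zero_add, Nat.sub_self,
        leadingZerosArrLoop, PySem.List.enumerate_cons, PySem.List.enumerate_nil,
        List.foldl_cons, List.foldl_nil, lastStep]
      split <;> rfl
    · have hne : t ++ [a] ≠ [] := by simp
      have hlen : 1 ≤ t.length := List.length_pos_iff.mpr ht
      simp only [leadingZerosArr, leadingZerosArr_alt, if_neg hne]
      have hlen' : (t ++ [a]).length - 1 = t.length := by simp
      rw [hlen', lastStep_append]
      obtain ⟨j, hj⟩ : ∃ j, t.length = j + 1 := ⟨t.length - 1, by omega⟩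
      by_cases ha : a = 0
      · -- last element zero: A steps into t, B's fold ignores it
        rw [if_neg (by simp [ha])]
        rw [hj]
        simp only [leadingZerosArrLoop]
        rw [PySem.List.pyGetD_natCast]
        have hget : (t ++ [a]).getD (j + 1) 0 = 0 := by
          rw [List.getD_eq_getElem?_getD, List.getElem?_append_right (by omega)]
          simp [hj, ha]
        rw [if_pos hget, loop_append t a j (by omega)]
        -- B side: slice of t ++ [0] up to L + 1 equals slice of t, since L + 1 ≤ len t
        have hB := ih ht
        simp only [leadingZerosArr, leadingZerosArr_alt, if_neg ht, hj,
          Nat.add_sub_cancel] at hB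
        have hbd := lastStep_bound t 0 0
        set L := (PySem.List.enumerate t 0).foldl lastStep 0 with hL
        have h0L : 0 ≤ L ∧ L + 1 ≤ (t.length : Int) := by
          rcases hbd with h1 | h1 <;> omega
        have hk : (((L + 1).toNat : Nat) : Int) = L + 1 := Int.toNat_of_nonneg (by omega)
        rw [hB, ← hk, PySem.List.slice_to_natCast, PySem.List.slice_to_natCast,
          List.take_append_of_le_length (by omega)]
      · -- last element nonzero: both return the whole list
        rw [if_pos (by simp [ha])]
        rw [hj]
        simp only [leadingZerosArrLoop]
        rw [PySem.List.pyGetD_natCast]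
        have hget : (t ++ [a]).getD (j + 1) 0 = a := by
          rw [List.getD_eq_getElem?_getD, List.getElem?_append_right (by omega)]
          simp [hj]
        rw [if_neg (by rw [hget]; exact ha)]
        have hc : (0 : Int) + ((j + 1 : Nat) : Int) + 1 = ((j + 2 : Nat) : Int) := by
          push_cast; ring
        rw [hc, PySem.List.slice_to_natCast]

-- ===== VERDICT (by name: the statement is the Claim_ definition above) =====
theorem leadingZerosArr_spec : Claim_equal_leadingZerosArr := by
  intro x _
  unfold Spec_leadingZerosArr
  by_cases hx : x = []
  · subst hx; rfl
  · exact main_eq x hx
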